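-- pv_equiv track=rewrite | github.com/seoda0000/TIL | AlgorithmProblemSolving/04_백준/03_Platinum/23291_어항_정리.py | share_fish
-- ===== SOURCE A (Python) =====
-- def share_fish(arr_bowls):
--     Nb = len(arr_bowls)
--     new_arr_bowls = [row[:] for row in arr_bowls]
--     for i in range(Nb):
--         Mb = len(arr_bowls[i])
--         for j in range(Mb):
--
--             # 대상 어항
--             cur = arr_bowls[i][j]
--             # 인접 어항 찾기
--             for d in range(2):
--                 ni, nj = i + di[d], j + dj[d]
--
--                 if nj >= Mb or ni >= Nb: continue
--
--                 # 인접 어항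
--                 nxt = arr_bowls[ni][nj]
--                 dif = abs(cur - nxt) // 5
--                 if dif == 0: continue
--
--                 if cur > nxt:
--                     new_arr_bowls[i][j] -= dif
--                     new_arr_bowls[ni][nj] += dif
--                 else:
--                     new_arr_bowls[i][j] += dif
--                     new_arr_bowls[ni][nj] -= dif
--
--     return new_arr_bowls
--
-- di = [0, 1]
--
-- dj = [1, 0]
-- ===== SOURCE B (Python) =====
-- def share_fish(arr_bowls):
--     # Gather formulation: each output cell is computed independently from its
--     # existing orthogonal neighbors; no in-place scatter updates.
--     def contrib(cell, ni, nj):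
--         if 0 <= ni < len(arr_bowls) and 0 <= nj < len(arr_bowls[ni]):
--             nb = arr_bowls[ni][nj]
--             d = abs(cell - nb) // 5
--             if cell < nb:
--                 return d
--             if cell > nb:
--                 return -d
--         return 0
--
--     return [
--         [cell
--          + contrib(cell, i, j - 1)
--          + contrib(cell, i, j + 1)
--          + contrib(cell, i - 1, j)
--          + contrib(cell, i + 1, j)
--          for j, cell in enumerate(row)]
--         for i, row in enumerate(arr_bowls)
--     ]
-- ===== Notes on version B (the rewrite author's own statement) =====
-- stated objective: alternative
-- what changed: Replaced A's in-place scatter of edge deltas (each cell pushes ±|cur-nxt|//5 to its right/down neighbor in a mutated copy) by a pure gather: each output cell is computed independently as its value plus the contributions of its four existing orthogonal neighbors, with no mutation.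
-- crash fix: On ragged grids where some row is longer than the next row, A raises IndexError (it reads arr_bowls[i+1][j] without checking that row's length); B bounds-checks every neighbor and returns the gathered grid. — e.g. on share_fish([[10], []]): A raises IndexError, B returns [[10], []]
import Mathlib
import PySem

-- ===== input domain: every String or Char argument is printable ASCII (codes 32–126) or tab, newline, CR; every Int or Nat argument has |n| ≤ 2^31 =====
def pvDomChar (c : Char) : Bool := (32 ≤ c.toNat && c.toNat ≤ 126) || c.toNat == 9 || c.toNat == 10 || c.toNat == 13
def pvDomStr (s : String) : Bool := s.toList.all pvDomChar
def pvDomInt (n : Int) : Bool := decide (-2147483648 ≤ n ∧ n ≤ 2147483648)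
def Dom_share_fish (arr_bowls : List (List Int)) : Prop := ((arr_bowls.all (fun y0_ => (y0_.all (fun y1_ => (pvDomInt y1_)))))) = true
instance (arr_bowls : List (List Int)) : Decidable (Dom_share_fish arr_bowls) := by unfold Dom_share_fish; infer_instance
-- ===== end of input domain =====

-- B replaces A's in-place scatter of right/down edge deltas by a pure per-cell gather
-- from the four orthogonal neighbors (objective: alternative decomposition, same cost).

-- ===== PORT A =====
-- All reads A performs are in range on inputs satisfying Pre_share_fish; getD's default is never
-- the returned value there.
def pvDi : List Nat := [0, 1]
def pvDj : List Nat := [1, 0]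
def pvGet (g : List (List Int)) (i j : Nat) : Int := (g.getD i []).getD j 0
def pvAdd (g : List (List Int)) (i j : Nat) (v : Int) : List (List Int) :=
  g.modify i (fun row => row.modify j (· + v))

def share_fish (arr_bowls : List (List Int)) : List (List Int) :=
  let Nb := arr_bowls.length
  (List.range Nb).foldl (fun acc1 i =>
    let Mb := (arr_bowls.getD i []).length
    (List.range Mb).foldl (fun acc2 j =>
      let cur := pvGet arr_bowls i j
      (List.range 2).foldl (fun acc3 d =>
        let ni := i + pvDi.getD d 0
        let nj := j + pvDj.getD d 0
        if Mb ≤ nj ∨ Nb ≤ ni then acc3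
        else
          let nxt := pvGet arr_bowls ni nj
          let dif : Int := ((cur - nxt).natAbs / 5 : Nat)
          if dif = 0 then acc3
          else if nxt < cur then pvAdd (pvAdd acc3 i j (-dif)) ni nj dif
          else pvAdd (pvAdd acc3 i j dif) ni nj (-dif)
      ) acc2
    ) acc1
  ) arr_bowls

-- ===== PORT B =====
def pvContrib (arr : List (List Int)) (cell : Int) (ni nj : Int) : Int :=
  if 0 ≤ ni ∧ ni < (arr.length : Int) ∧ 0 ≤ nj ∧ nj < ((arr.getD ni.toNat []).length : Int) then
    let nb := (arr.getD ni.toNat []).getD nj.toNat 0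
    let d : Int := ((cell - nb).natAbs / 5 : Nat)
    if cell < nb then d else if nb < cell then -d else 0
  else 0

def share_fish_alt (arr_bowls : List (List Int)) : List (List Int) :=
  arr_bowls.mapIdx (fun i row => row.mapIdx (fun j cell =>
    cell + pvContrib arr_bowls cell (i : Int) ((j : Int) - 1)
         + pvContrib arr_bowls cell (i : Int) ((j : Int) + 1)
         + pvContrib arr_bowls cell ((i : Int) - 1) (j : Int)
         + pvContrib arr_bowls cell ((i : Int) + 1) (j : Int)))

-- ===== PRECONDITION & SPEC =====
-- Pre_ excludes exactly the ragged grids on which A raises IndexError (it reads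
-- arr_bowls[i+1][j] without checking row i+1's length): some row longer than the next one.
def Pre_share_fish (arr_bowls : List (List Int)) : Prop :=
  ∀ i < arr_bowls.length, i + 1 < arr_bowls.length →
    (arr_bowls.getD i []).length ≤ (arr_bowls.getD (i + 1) []).length
instance (arr_bowls : List (List Int)) : Decidable (Pre_share_fish arr_bowls) := by
  unfold Pre_share_fish; infer_instance
def pvWitness_share_fish : List (List Int) := [[10, 2], [3, 21, 5]]

-- On ragged grids where some row is longer than the next row, A raises IndexError; B
-- bounds-checks every neighbor and returns the gathered grid.
def Raises_share_fish (arr_bowls : List (List Int)) : Prop :=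
  ∃ i, i + 1 < arr_bowls.length ∧
    (arr_bowls.getD (i + 1) []).length < (arr_bowls.getD i []).length
instance (arr_bowls : List (List Int)) : Decidable (Raises_share_fish arr_bowls) := by
  unfold Raises_share_fish
  exact decidable_of_iff (∃ i < arr_bowls.length, i + 1 < arr_bowls.length ∧
      (arr_bowls.getD (i + 1) []).length < (arr_bowls.getD i []).length)
    ⟨fun ⟨i, _, h⟩ => ⟨i, h⟩, fun ⟨i, h1, h2⟩ => ⟨i, by omega, h1, h2⟩⟩
def pvRaiseWitness_share_fish : List (List Int) := [[10], []]
def pvRaiseWitnessOut_share_fish : List (List Int) := [[10], []]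

def Spec_share_fish (arr_bowls : List (List Int)) (out : List (List Int)) : Prop := out = share_fish_alt arr_bowls
instance (arr_bowls : List (List Int)) (out : List (List Int)) : Decidable (Spec_share_fish arr_bowls out) := by unfold Spec_share_fish; infer_instance

-- ===== CLAIM (what is proved, stated in full; the proofs are below) =====
def Claim_equal_share_fish : Prop := ∀ (arr_bowls : List (List Int)), Dom_share_fish arr_bowls → Pre_share_fish arr_bowls → Spec_share_fish arr_bowls (share_fish arr_bowls)
def Claim_raises_share_fish : Prop := (∀ (arr_bowls : List (List Int)), Dom_share_fish arr_bowls → Raises_share_fish arr_bowls → ¬ Pre_share_fish arr_bowls) ∧ (Dom_share_fish (pvRaiseWitness_share_fish) ∧ Raises_share_fish (pvRaiseWitness_share_fish) ∧ share_fish_alt (pvRaiseWitness_share_fish) = pvRaiseWitnessOut_share_fish)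

-- ===== LEMMAS AND PROOFS =====

-- events: (position, amount) pairs; A's scatter loop is a fold of these over the grid
def applyEv (g : List (List Int)) (e : (Nat × Nat) × Int) : List (List Int) :=
  pvAdd g e.1.1 e.1.2 e.2
def evAt (a b : Nat) (e : (Nat × Nat) × Int) : Int :=
  if e.1.1 = a ∧ e.1.2 = b then e.2 else 0
def okEv (g : List (List Int)) (e : (Nat × Nat) × Int) : Prop :=
  e.1.1 < g.length ∧ e.1.2 < (g.getD e.1.1 []).length

def evs1 (arr : List (List Int)) (i j d : Nat) : List ((Nat × Nat) × Int) :=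
  let ni := i + pvDi.getD d 0
  let nj := j + pvDj.getD d 0
  if (arr.getD i []).length ≤ nj ∨ arr.length ≤ ni then []
  else
    let cur := pvGet arr i j
    let nxt := pvGet arr ni nj
    let dif : Int := ((cur - nxt).natAbs / 5 : Nat)
    if dif = 0 then []
    else if nxt < cur then [((i, j), -dif), ((ni, nj), dif)]
    else [((i, j), dif), ((ni, nj), -dif)]

def bigEvs (arr : List (List Int)) : List ((Nat × Nat) × Int) :=
  (List.range arr.length).flatMap (fun i =>
    (List.range (arr.getD i []).length).flatMap (fun j =>
      (List.range 2).flatMap (fun d => evs1 arr i j d)))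

theorem length_pvAdd (g : List (List Int)) (i j : Nat) (v : Int) :
    (pvAdd g i j v).length = g.length := List.length_modify _ g i

theorem row_pvAdd (g : List (List Int)) (i j : Nat) (v : Int) (a : Nat) :
    (pvAdd g i j v).getD a [] =
      if a = i then (g.getD i []).modify j (· + v) else g.getD a [] := by
  simp only [pvAdd, List.getD_eq_getElem?_getD, List.getElem?_modify]
  by_cases hia : a = i
  · subst hia; cases h : g[a]? <;> simp [h]
  · cases h : g[a]? <;> simp [h, Ne.symm hia, hia]

theorem rowlen_pvAdd (g : List (List Int)) (i j : Nat) (v : Int) (a : Nat) :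
    ((pvAdd g i j v).getD a []).length = (g.getD a []).length := by
  rw [row_pvAdd]
  by_cases hia : a = i <;> simp [hia, List.length_modify]

theorem getD_modify_add (row : List Int) (j b : Nat) (v : Int) :
    (row.modify j (· + v)).getD b 0 =
      row.getD b 0 + (if b = j ∧ j < row.length then v else 0) := by
  induction row generalizing j b with
  | nil => simp
  | cons x t ih =>
    cases j with
    | zero => cases b <;> simp
    | succ j' =>
      cases b with
      | zero => simp
      | succ b' => simpa [Nat.succ_lt_succ_iff] using ih j' b'

theorem pvGet_pvAdd (g : List (List Int)) (i j : Nat) (v : Int) (a b : Nat) :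
    pvGet (pvAdd g i j v) a b =
      pvGet g a b + (if a = i ∧ b = j ∧ j < (g.getD i []).length then v else 0) := by
  unfold pvGet
  rw [row_pvAdd]
  by_cases hia : a = i
  · subst hia; rw [if_pos rfl, getD_modify_add]; simp
  · simp [hia]

theorem pvGet_foldl (evs : List ((Nat × Nat) × Int)) (g : List (List Int))
    (h : ∀ e ∈ evs, okEv g e) (a b : Nat) :
    pvGet (evs.foldl applyEv g) a b = pvGet g a b + (evs.map (evAt a b)).sum := by
  induction evs generalizing g with
  | nil => simp
  | cons e t ih =>
    have he := h e (by simp)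
    have ht : ∀ e' ∈ t, okEv (applyEv g e) e' := by
      intro e' he'
      have := h e' (by simp [he'])
      unfold okEv applyEv at *
      rwa [length_pvAdd, rowlen_pvAdd]
    rw [List.foldl_cons, ih _ ht]
    unfold applyEv
    rw [pvGet_pvAdd]
    have : (if a = e.1.1 ∧ b = e.1.2 ∧ e.1.2 < (g.getD e.1.1 []).length then e.2 else 0)
        = evAt a b e := by
      unfold evAt okEv at *
      have hlt := he.2
      rw [List.getD_eq_getElem?_getD] at hlt
      by_cases h1 : a = e.1.1 <;> by_cases h2 : b = e.1.2 <;>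
        simp [h1, h2, @eq_comm _ a, @eq_comm _ b] <;> omega
    rw [this]; simp; ring

theorem length_foldl_applyEv (evs : List ((Nat × Nat) × Int)) (g : List (List Int)) :
    (evs.foldl applyEv g).length = g.length := by
  induction evs generalizing g with
  | nil => rfl
  | cons e t ih => rw [List.foldl_cons, ih]; exact length_pvAdd ..

theorem rowlen_foldl_applyEv (evs : List ((Nat × Nat) × Int)) (g : List (List Int)) (a : Nat) :
    ((evs.foldl applyEv g).getD a []).length = (g.getD a []).length := by
  induction evs generalizing g with
  | nil => rfl
  | cons e t ih => rw [List.foldl_cons, ih]; exact rowlen_pvAdd ..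

theorem foldl_flatMap_ev {α : Type} (l : List α) (g : α → List ((Nat × Nat) × Int))
    (init : List (List Int)) :
    (l.flatMap g).foldl applyEv init = l.foldl (fun acc x => (g x).foldl applyEv acc) init := by
  induction l generalizing init with
  | nil => rfl
  | cons x t ih => rw [List.flatMap_cons, List.foldl_append, List.foldl_cons, ih]

theorem share_fish_eq_foldl (arr : List (List Int)) :
    share_fish arr = (bigEvs arr).foldl applyEv arr := by
  simp only [share_fish, bigEvs, foldl_flatMap_ev]
  congr 1
  funext acc1 i
  congr 1
  funext acc2 j
  congr 1
  funext acc3 d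
  simp only [evs1]
  split_ifs <;> rfl

theorem okEv_bigEvs (arr : List (List Int)) (hpre : Pre_share_fish arr) :
    ∀ e ∈ bigEvs arr, okEv arr e := by
  intro e he
  simp only [bigEvs, List.mem_flatMap, List.mem_range] at he
  obtain ⟨i, hi, j, hj, d, hd, hev⟩ := he
  interval_cases d
  · simp only [evs1, pvDi, pvDj, List.getD_cons_zero, List.getD_cons_succ,
      Nat.add_zero] at hev
    split_ifs at hev with hg hdif
    · exact absurd hev List.not_mem_nil
    · exact absurd hev List.not_mem_nil
    all_goals {
      push_neg at hg
      simp only [List.mem_cons, List.not_mem_nil, or_false] at hev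
      rcases hev with rfl | rfl
      · exact ⟨hi, hj⟩
      · refine ⟨hi, ?_⟩
        show j + 1 < (arr.getD i []).length
        omega }
  · simp only [evs1, pvDi, pvDj, List.getD_cons_zero, List.getD_cons_succ,
      Nat.add_zero] at hev
    split_ifs at hev with hg hdif
    · exact absurd hev List.not_mem_nil
    · exact absurd hev List.not_mem_nil
    all_goals {
      push_neg at hg
      simp only [List.mem_cons, List.not_mem_nil, or_false] at hev
      rcases hev with rfl | rfl
      · exact ⟨hi, hj⟩
      · refine ⟨show i + 1 < arr.length by omega, ?_⟩
        show j < (arr.getD (i + 1) []).length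
        have := hpre i hi (by omega)
        omega }

theorem sum_map_flatMap {α β : Type} (l : List α) (g : α → List β) (f : β → Int) :
    ((l.flatMap g).map f).sum = (l.map (fun x => ((g x).map f).sum)).sum := by
  induction l with
  | nil => rfl
  | cons x t ih => simp [List.flatMap_cons, ih]

theorem sum_range_one_pt (h : Nat → Int) (u n : Nat) (hz : ∀ i, i ≠ u → h i = 0) :
    ((List.range n).map h).sum = if u < n then h u else 0 := by
  induction n with
  | zero => simp
  | succ n ih =>
    rw [List.range_succ, List.map_append, List.sum_append, ih]
    simp only [List.map_cons, List.map_nil, List.sum_cons, List.sum_nil, add_zero]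
    by_cases hn : u = n
    · rw [if_neg (by omega : ¬ u < n), if_pos (by omega : u < n + 1), hn]; ring
    · rw [hz n (fun hh => hn hh.symm), add_zero]
      simp only [(propext ⟨fun hh => by omega, fun hh => by omega⟩ : (u < n) = (u < n + 1))]

theorem sum_range_two_pt (h : Nat → Int) (u v n : Nat) (huv : u ≠ v)
    (hz : ∀ i, i ≠ u → i ≠ v → h i = 0) :
    ((List.range n).map h).sum = (if u < n then h u else 0) + (if v < n then h v else 0) := by
  induction n with
  | zero => simp
  | succ n ih =>
    rw [List.range_succ, List.map_append, List.sum_append, ih]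
    simp only [List.map_cons, List.map_nil, List.sum_cons, List.sum_nil, add_zero]
    by_cases hun : u = n
    · rw [if_neg (by omega : ¬ u < n), if_pos (by omega : u < n + 1), hun]
      simp only [(propext ⟨fun hh => by omega, fun hh => by omega⟩ : (v < n) = (v < n + 1))]
      ring
    · by_cases hvn : v = n
      · rw [if_neg (by omega : ¬ v < n), if_pos (by omega : v < n + 1), hvn]
        simp only [(propext ⟨fun hh => by omega, fun hh => by omega⟩ : (u < n) = (u < n + 1))]
        ring
      · rw [hz n (fun hh => hun hh.symm) (fun hh => hvn hh.symm), add_zero]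
        simp only [(propext ⟨fun hh => by omega, fun hh => by omega⟩ : (u < n) = (u < n + 1)),
          (propext ⟨fun hh => by omega, fun hh => by omega⟩ : (v < n) = (v < n + 1))]

def amt (arr : List (List Int)) (a b i j d : Nat) : Int :=
  ((evs1 arr i j d).map (evAt a b)).sum

-- zero lemmas
theorem amt_zero_row (arr : List (List Int)) (a b i j : Nat) (d : Nat) (hd : d < 2)
    (h1 : i ≠ a) (h2 : i + 1 ≠ a) : amt arr a b i j d = 0 := by
  interval_cases d <;>
    simp only [amt, evs1, pvDi, pvDj, List.getD_cons_zero, List.getD_cons_succ,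
      Nat.add_zero] <;>
    split_ifs <;> simp [evAt, h1, h2]

theorem amt_right_zero (arr : List (List Int)) (a b j : Nat) (h1 : j ≠ b) (h2 : j + 1 ≠ b) :
    amt arr a b a j 0 = 0 := by
  simp only [amt, evs1, pvDi, pvDj, List.getD_cons_zero, List.getD_cons_succ, Nat.add_zero]
  split_ifs <;> simp [evAt, h1, h2]

theorem amt_down_zero (arr : List (List Int)) (a b i j : Nat) (h1 : j ≠ b) :
    amt arr a b i j 1 = 0 := by
  simp only [amt, evs1, pvDi, pvDj, List.getD_cons_zero, List.getD_cons_succ, Nat.add_zero]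
  split_ifs <;> simp [evAt, h1]


theorem amt_down_zero' (arr : List (List Int)) (a b j : Nat) (ha : 1 ≤ a) :
    amt arr a b (a - 1) j 0 = 0 := by
  have hne : a - 1 ≠ a := by omega
  simp only [amt, evs1, pvDi, pvDj, List.getD_cons_zero, List.getD_cons_succ, Nat.add_zero]
  split_ifs <;> simp [evAt, hne]


-- value lemmas
theorem amt_right (arr : List (List Int)) (a b : Nat) (ha : a < arr.length) :
    amt arr a b a b 0 = pvContrib arr (pvGet arr a b) (a : Int) ((b : Int) + 1) := by
  have hc1 : ((a : Int)).toNat = a := Int.toNat_natCast a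
  have hc2 : ((b : Int) + 1) = ((b + 1 : Nat) : Int) := by push_cast; ring
  simp only [amt, evs1, pvContrib, pvDi, pvDj, List.getD_cons_zero,
    Nat.add_zero, hc1, hc2, Int.toNat_natCast]
  by_cases hcase : b + 1 < (arr.getD a []).length
  · rw [if_neg (show ¬((arr.getD a []).length ≤ b + 1 ∨ arr.length ≤ a) by omega),
      if_pos (show (0:Int) ≤ (a:Int) ∧ (a:Int) < (arr.length:Int) ∧
        (0:Int) ≤ ((b+1:Nat):Int) ∧ ((b+1:Nat):Int) < ((arr.getD a []).length:Int) by
          push_cast; omega)]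
    simp only [pvGet]
    generalize hN : ((arr.getD a []).getD b 0 - (arr.getD a []).getD (b + 1) 0).natAbs = N
    split_ifs <;>
      simp only [List.map_cons, List.map_nil, List.sum_cons, List.sum_nil, add_zero, evAt,
        eq_self_iff_true, true_and, and_true, if_true, Nat.succ_ne_self, if_false,
        and_false, false_and]
    all_goals omega
  · rw [if_pos (show (arr.getD a []).length ≤ b + 1 ∨ arr.length ≤ a by omega),
      if_neg (show ¬((0:Int) ≤ (a:Int) ∧ (a:Int) < (arr.length:Int) ∧
        (0:Int) ≤ ((b+1:Nat):Int) ∧ ((b+1:Nat):Int) < ((arr.getD a []).length:Int)) by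
          push_cast; omega)]
    simp


theorem amt_left (arr : List (List Int)) (a b : Nat) (ha : a < arr.length)
    (hb : b < (arr.getD a []).length) (hb1 : 1 ≤ b) :
    amt arr a b a (b - 1) 0 = pvContrib arr (pvGet arr a b) (a : Int) ((b : Int) - 1) := by
  have hc2 : ((b : Int) - 1) = ((b - 1 : Nat) : Int) := by omega
  have hb' : b - 1 + 1 = b := by omega
  have hbne : b - 1 ≠ b := by omega
  simp only [amt, evs1, pvContrib, pvDi, pvDj, List.getD_cons_zero,
    Nat.add_zero, hc2, Int.toNat_natCast, hb']
  rw [if_neg (show ¬((arr.getD a []).length ≤ b ∨ arr.length ≤ a) by omega),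
    if_pos (show (0:Int) ≤ (a:Int) ∧ (a:Int) < (arr.length:Int) ∧
      (0:Int) ≤ ((b-1:Nat):Int) ∧ ((b-1:Nat):Int) < ((arr.getD a []).length:Int) by
        push_cast; omega)]
  simp only [pvGet]
  generalize hN : ((arr.getD a []).getD (b - 1) 0 - (arr.getD a []).getD b 0).natAbs = N
  generalize hM : ((arr.getD a []).getD b 0 - (arr.getD a []).getD (b - 1) 0).natAbs = M
  split_ifs <;>
    simp only [List.map_cons, List.map_nil, List.sum_cons, List.sum_nil, add_zero, evAt,
      eq_self_iff_true, true_and, and_true, if_true, hbne, if_false, and_false, false_and]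
  all_goals omega


theorem amt_down (arr : List (List Int)) (a b : Nat) (hpre : Pre_share_fish arr)
    (ha : a < arr.length) (hb : b < (arr.getD a []).length) :
    amt arr a b a b 1 = pvContrib arr (pvGet arr a b) ((a : Int) + 1) (b : Int) := by
  have hc2 : ((a : Int) + 1) = ((a + 1 : Nat) : Int) := by push_cast; ring
  have hane : a + 1 ≠ a := by omega
  simp only [amt, evs1, pvContrib, pvDi, pvDj, List.getD_cons_zero, List.getD_cons_succ,
    Nat.add_zero, hc2, Int.toNat_natCast]
  by_cases hlen : a + 1 < arr.length
  · have hle := hpre a ha hlen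
    rw [if_neg (show ¬((arr.getD a []).length ≤ b ∨ arr.length ≤ a + 1) by omega),
      if_pos (show (0:Int) ≤ ((a+1:Nat):Int) ∧ ((a+1:Nat):Int) < (arr.length:Int) ∧
        (0:Int) ≤ (b:Int) ∧ (b:Int) < ((arr.getD (a+1) []).length:Int) by
          push_cast; omega)]
    simp only [pvGet]
    generalize hN : ((arr.getD a []).getD b 0 - (arr.getD (a + 1) []).getD b 0).natAbs = N
    split_ifs <;>
      simp only [List.map_cons, List.map_nil, List.sum_cons, List.sum_nil, add_zero, evAt,
        eq_self_iff_true, true_and, and_true, if_true, hane, if_false, and_false, false_and]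
    all_goals omega
  · rw [if_pos (show (arr.getD a []).length ≤ b ∨ arr.length ≤ a + 1 by omega),
      if_neg (show ¬((0:Int) ≤ ((a+1:Nat):Int) ∧ ((a+1:Nat):Int) < (arr.length:Int) ∧
        (0:Int) ≤ (b:Int) ∧ (b:Int) < ((arr.getD (a+1) []).length:Int)) by
          push_cast; omega)]
    simp


theorem amt_up (arr : List (List Int)) (a b : Nat) (ha : a < arr.length) (ha1 : 1 ≤ a)
    (hb : b < (arr.getD a []).length) :
    (if b < (arr.getD (a - 1) []).length then amt arr a b (a - 1) b 1 else 0) =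
      pvContrib arr (pvGet arr a b) ((a : Int) - 1) (b : Int) := by
  have hc2 : ((a : Int) - 1) = ((a - 1 : Nat) : Int) := by omega
  have ha' : a - 1 + 1 = a := by omega
  have hane : a - 1 ≠ a := by omega
  by_cases hcase : b < (arr.getD (a - 1) []).length
  · rw [if_pos hcase]
    simp only [amt, evs1, pvContrib, pvDi, pvDj, List.getD_cons_zero, List.getD_cons_succ,
      Nat.add_zero, hc2, Int.toNat_natCast, ha']
    rw [if_neg (show ¬((arr.getD (a - 1) []).length ≤ b ∨ arr.length ≤ a) by omega),
      if_pos (show (0:Int) ≤ ((a-1:Nat):Int) ∧ ((a-1:Nat):Int) < (arr.length:Int) ∧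
        (0:Int) ≤ (b:Int) ∧ (b:Int) < ((arr.getD (a-1) []).length:Int) by
          push_cast; omega)]
    simp only [pvGet]
    generalize hN : ((arr.getD (a - 1) []).getD b 0 - (arr.getD a []).getD b 0).natAbs = N
    generalize hM : ((arr.getD a []).getD b 0 - (arr.getD (a - 1) []).getD b 0).natAbs = M
    split_ifs <;>
      simp only [List.map_cons, List.map_nil, List.sum_cons, List.sum_nil, add_zero, evAt,
        eq_self_iff_true, true_and, and_true, if_true, hane, if_false, and_false, false_and]
    all_goals omega
  · rw [if_neg hcase]
    simp only [pvContrib, hc2, Int.toNat_natCast]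
    rw [if_neg (show ¬((0:Int) ≤ ((a-1:Nat):Int) ∧ ((a-1:Nat):Int) < (arr.length:Int) ∧
      (0:Int) ≤ (b:Int) ∧ (b:Int) < ((arr.getD (a-1) []).length:Int)) by
        push_cast; omega)]


theorem pvContrib_neg (arr : List (List Int)) (cell : Int) (ni nj : Int)
    (h : ni < 0 ∨ nj < 0) : pvContrib arr cell ni nj = 0 := by
  simp only [pvContrib]
  rw [if_neg (by omega)]

-- the gather value of cell (a,b)
theorem sum_bigEvs (arr : List (List Int)) (hpre : Pre_share_fish arr) (a b : Nat)
    (ha : a < arr.length) (hb : b < (arr.getD a []).length) :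
    ((bigEvs arr).map (evAt a b)).sum =
      pvContrib arr (pvGet arr a b) (a : Int) ((b : Int) - 1)
      + pvContrib arr (pvGet arr a b) (a : Int) ((b : Int) + 1)
      + pvContrib arr (pvGet arr a b) ((a : Int) - 1) (b : Int)
      + pvContrib arr (pvGet arr a b) ((a : Int) + 1) (b : Int) := by
  have hrange2 : ∀ i j : Nat,
      ((List.range 2).map (fun d => ((evs1 arr i j d).map (evAt a b)).sum)).sum
        = amt arr a b i j 0 + amt arr a b i j 1 := by
    intro i j
    rw [show List.range 2 = [0, 1] from rfl]
    simp [amt]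
  simp only [bigEvs, sum_map_flatMap, hrange2]
  by_cases haz : a = 0
  · subst haz
    rw [sum_range_one_pt _ 0 arr.length (fun i hi => by
      have h0 : ∀ j, amt arr 0 b i j 0 + amt arr 0 b i j 1 = 0 := fun j => by
        rw [amt_zero_row arr 0 b i j 0 (by omega) hi (by omega),
            amt_zero_row arr 0 b i j 1 (by omega) hi (by omega)]; ring
      simp [h0])]
    rw [if_pos (by omega : 0 < arr.length)]
    rw [pvContrib_neg arr _ _ _ (Or.inl (by norm_num : ((0:Nat):Int) - 1 < 0))]
    by_cases hbz : b = 0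
    · subst hbz
      rw [sum_range_one_pt _ 0 _ (fun j hj => by
        rw [amt_right_zero arr 0 0 j hj (by omega), amt_down_zero arr 0 0 0 j hj]; ring)]
      rw [if_pos (by omega : 0 < (arr.getD 0 []).length)]
      rw [amt_right arr 0 0 ha, amt_down arr 0 0 hpre ha hb,
          pvContrib_neg arr _ _ _ (Or.inr (by norm_num : ((0:Nat):Int) - 1 < 0))]
      ring
    · rw [sum_range_two_pt _ (b - 1) b _ (by omega) (fun j hj1 hj2 => by
        rw [amt_right_zero arr 0 b j hj2 (by omega), amt_down_zero arr 0 b 0 j hj2]; ring)]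
      rw [if_pos (by omega : b - 1 < (arr.getD 0 []).length), if_pos hb]
      rw [amt_down_zero arr 0 b 0 (b - 1) (by omega), amt_left arr 0 b ha hb (by omega),
          amt_right arr 0 b ha, amt_down arr 0 b hpre ha hb]
      ring
  · rw [sum_range_two_pt _ (a - 1) a arr.length (by omega) (fun i hi1 hi2 => by
      have h0 : ∀ j, amt arr a b i j 0 + amt arr a b i j 1 = 0 := fun j => by
        rw [amt_zero_row arr a b i j 0 (by omega) hi2 (by omega),
            amt_zero_row arr a b i j 1 (by omega) hi2 (by omega)]; ring
      simp [h0])]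
    rw [if_pos (by omega : a - 1 < arr.length), if_pos ha]
    rw [sum_range_one_pt _ b _ (fun j hj => by
      rw [amt_down_zero' arr a b j (by omega), amt_down_zero arr a b (a - 1) j hj]; ring)]
    have hup : (if b < (arr.getD (a - 1) []).length
          then amt arr a b (a - 1) b 0 + amt arr a b (a - 1) b 1 else 0)
        = pvContrib arr (pvGet arr a b) ((a : Int) - 1) (b : Int) := by
      rw [← amt_up arr a b ha (by omega) hb]
      by_cases hc : b < (arr.getD (a - 1) []).length
      · rw [if_pos hc, if_pos hc, amt_down_zero' arr a b b (by omega)]; ring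
      · rw [if_neg hc, if_neg hc]
    rw [hup]
    by_cases hbz : b = 0
    · subst hbz
      rw [sum_range_one_pt _ 0 _ (fun j hj => by
        rw [amt_right_zero arr a 0 j hj (by omega), amt_down_zero arr a 0 a j hj]; ring)]
      rw [if_pos (by omega : 0 < (arr.getD a []).length)]
      rw [amt_right arr a 0 ha, amt_down arr a 0 hpre ha hb,
          pvContrib_neg arr _ _ _ (Or.inr (by norm_num : ((0:Nat):Int) - 1 < 0))]
      ring
    · rw [sum_range_two_pt _ (b - 1) b _ (by omega) (fun j hj1 hj2 => by
        rw [amt_right_zero arr a b j hj2 (by omega), amt_down_zero arr a b a j hj2]; ring)]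
      rw [if_pos (by omega : b - 1 < (arr.getD a []).length), if_pos hb]
      rw [amt_down_zero arr a b a (b - 1) (by omega), amt_left arr a b ha hb (by omega),
          amt_right arr a b ha, amt_down arr a b hpre ha hb]
      ring

-- ===== VERDICT (by name: the statement is the Claim_ definition above) =====
theorem lenA (arr : List (List Int)) : (share_fish arr).length = arr.length := by
  rw [share_fish_eq_foldl, length_foldl_applyEv]

theorem rowlenA (arr : List (List Int)) (a : Nat) :
    ((share_fish arr).getD a []).length = (arr.getD a []).length := by
  rw [share_fish_eq_foldl, rowlen_foldl_applyEv]

theorem getA (arr : List (List Int)) (hpre : Pre_share_fish arr) (a b : Nat)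
    (ha : a < arr.length) (hb : b < (arr.getD a []).length) :
    pvGet (share_fish arr) a b = pvGet arr a b
      + (pvContrib arr (pvGet arr a b) (a : Int) ((b : Int) - 1)
      + pvContrib arr (pvGet arr a b) (a : Int) ((b : Int) + 1)
      + pvContrib arr (pvGet arr a b) ((a : Int) - 1) (b : Int)
      + pvContrib arr (pvGet arr a b) ((a : Int) + 1) (b : Int)) := by
  rw [share_fish_eq_foldl, pvGet_foldl _ _ (okEv_bigEvs arr hpre),
    sum_bigEvs arr hpre a b ha hb]

theorem lenB (arr : List (List Int)) : (share_fish_alt arr).length = arr.length := by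
  simp [share_fish_alt]

theorem rowlenB (arr : List (List Int)) (a : Nat) :
    ((share_fish_alt arr).getD a []).length = (arr.getD a []).length := by
  by_cases ha : a < arr.length
  · rw [List.getD_eq_getElem _ [] (by rw [lenB]; exact ha), List.getD_eq_getElem arr [] ha]
    simp [share_fish_alt, List.getElem_mapIdx]
  · rw [List.getD_eq_default _ [] (by rw [lenB]; omega),
      List.getD_eq_default _ [] (by omega)]

theorem getB (arr : List (List Int)) (a b : Nat)
    (ha : a < arr.length) (hb : b < (arr.getD a []).length) :
    pvGet (share_fish_alt arr) a b = pvGet arr a b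
      + pvContrib arr (pvGet arr a b) (a : Int) ((b : Int) - 1)
      + pvContrib arr (pvGet arr a b) (a : Int) ((b : Int) + 1)
      + pvContrib arr (pvGet arr a b) ((a : Int) - 1) (b : Int)
      + pvContrib arr (pvGet arr a b) ((a : Int) + 1) (b : Int) := by
  have hb' : b < arr[a].length := by rwa [List.getD_eq_getElem arr [] ha] at hb
  have e1 : (arr.getD a []).getD b 0 = arr[a][b] := by
    rw [List.getD_eq_getElem arr [] ha, List.getD_eq_getElem _ 0 hb']
  unfold pvGet
  rw [List.getD_eq_getElem _ [] (by rw [lenB]; exact ha)]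
  simp only [share_fish_alt, List.getElem_mapIdx]
  rw [List.getD_eq_getElem _ 0 (by simpa using hb')]
  simp only [List.getElem_mapIdx]
  rw [e1]

theorem grid_ext (g1 g2 : List (List Int)) (hlen : g1.length = g2.length)
    (hrow : ∀ a, a < g1.length → (g1.getD a []).length = (g2.getD a []).length)
    (hval : ∀ a b, a < g1.length → b < (g1.getD a []).length → pvGet g1 a b = pvGet g2 a b) :
    g1 = g2 := by
  apply List.ext_getElem hlen
  intro n h1 h2
  apply List.ext_getElem
  · have := hrow n h1
    rwa [List.getD_eq_getElem _ _ h1, List.getD_eq_getElem _ _ h2] at this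
  · intro m hm1 hm2
    have hv := hval n m h1 (by rw [List.getD_eq_getElem _ _ h1]; exact hm1)
    unfold pvGet at hv
    rwa [List.getD_eq_getElem _ _ h1, List.getD_eq_getElem _ _ h2,
      List.getD_eq_getElem _ _ hm1, List.getD_eq_getElem _ _ hm2] at hv

-- ===== VERDICT (by name: the statement is the Claim_ definition above) =====
theorem share_fish_spec : Claim_equal_share_fish := by
  intro arr _ hpre
  unfold Spec_share_fish
  apply grid_ext
  · rw [lenA, lenB]
  · intro a _
    rw [rowlenA, rowlenB]
  · intro a b ha hb
    rw [lenA] at ha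
    rw [rowlenA] at hb
    rw [getA arr hpre a b ha hb, getB arr a b ha hb]
    ring

def share_fish_raises : Claim_raises_share_fish := by
  unfold Claim_raises_share_fish
  constructor
  · intro arr _ ⟨i, h1, h2⟩ hpre
    exact absurd (hpre i (by omega) h1) (by omega)
  · exact ⟨by decide, ⟨0, by decide⟩, by decide⟩
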